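-- pv_equiv track=rewrite | github.com/SamuelVedrik/adventofcode2021 | day14.py | recursive_builder
-- ===== SOURCE A (Python) =====
-- def recursive_builder(input_, instructions):
--     if len(input_) == 1:
--         return input_
--     mid = len(input_) // 2
--     left = recursive_builder(input_[:mid], instructions)
--     right = recursive_builder(input_[mid:], instructions)
--     connect = f"{left[-1]}{right[0]}"
--     join = instructions.get(connect, "")
--     return left + join + right
-- ===== SOURCE B (Python) =====
-- def recursive_builder(input_, instructions):
--     result = list(input_[:1])
--     for a, b in zip(input_, input_[1:]):
--         result.append(instructions.get(a + b, ""))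
--         result.append(b)
--     return "".join(result)
-- ===== Notes on version B (the rewrite author's own statement) =====
-- stated objective: faster
-- what changed: Replaces the halve-and-recurse divide-and-conquer (with repeated string slicing and concatenation) by a single flat left-to-right pass over adjacent character pairs accumulating pieces joined once at the end.
import Mathlib
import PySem

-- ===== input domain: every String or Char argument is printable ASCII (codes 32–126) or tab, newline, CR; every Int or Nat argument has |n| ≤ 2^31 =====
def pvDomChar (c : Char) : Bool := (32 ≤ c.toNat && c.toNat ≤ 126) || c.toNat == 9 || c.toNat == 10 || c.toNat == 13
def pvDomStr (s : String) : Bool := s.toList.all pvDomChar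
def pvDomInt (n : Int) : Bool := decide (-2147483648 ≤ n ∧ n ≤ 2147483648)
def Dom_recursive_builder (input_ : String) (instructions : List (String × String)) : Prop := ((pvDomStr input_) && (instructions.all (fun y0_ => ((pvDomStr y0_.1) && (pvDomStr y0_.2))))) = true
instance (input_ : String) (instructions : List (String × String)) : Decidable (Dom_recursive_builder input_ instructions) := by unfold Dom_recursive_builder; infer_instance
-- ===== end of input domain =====

-- B replaces A's halve-and-recurse construction by one flat pass over adjacent pairs;
-- equivalence is proved for nonempty input_ (on "" the Python A never returns: RecursionError).

-- instructions.get(connect, "") — Python dict lookup (later duplicate keys overwrite earlier ones)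
def rbGet (instructions : List (String × String)) (a b : Char) : String :=
  (PySem.Dict.ofList instructions).getD (String.ofList [a, b]) ""

-- ===== PORT A =====
-- fuel = length of the string makes the recursion total; it is never exhausted on a
-- nonempty input (each recursive call strictly shrinks the string).  left[-1]/right[0]
-- are total here because left/right are nonempty whenever the input is nonempty.
def rbGo (instructions : List (String × String)) : Nat → List Char → List Char
  | 0, s => s
  | fuel + 1, s =>
    if s.length = 1 then s
    else
      let mid := s.length / 2
      let left := rbGo instructions fuel (s.take mid)
      let right := rbGo instructions fuel (s.drop mid)
      let join := (rbGet instructions (left.getLastD ' ') (right.headD ' ')).toList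
      left ++ join ++ right

def recursive_builder (input_ : String) (instructions : List (String × String)) : String :=
  String.ofList (rbGo instructions input_.toList.length input_.toList)

-- ===== PORT B =====
def recursive_builder_alt (input_ : String) (instructions : List (String × String)) : String :=
  let cs := input_.toList
  let result := (cs.zip cs.tail).foldl
    (fun acc p => acc ++ [rbGet instructions p.1 p.2, String.ofList [p.2]])
    [String.ofList (cs.take 1)]
  PySem.Str.join "" result

-- ===== PRECONDITION & SPEC =====
-- On input_ = "" the Python A recurses forever (RecursionError); it returns on every other input.
def Pre_recursive_builder (input_ : String) (instructions : List (String × String)) : Prop :=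
  input_ ≠ ""
instance (input_ : String) (instructions : List (String × String)) : Decidable (Pre_recursive_builder input_ instructions) := by unfold Pre_recursive_builder; infer_instance

def pvWitness_recursive_builder : String × (List (String × String)) := ("NNCB", [("NC", "B"), ("CB", "H")])

def Spec_recursive_builder (input_ : String) (instructions : List (String × String)) (out : String) : Prop := out = recursive_builder_alt input_ instructions
instance (input_ : String) (instructions : List (String × String)) (out : String) : Decidable (Spec_recursive_builder input_ instructions out) := by unfold Spec_recursive_builder; infer_instance

-- ===== CLAIM (what is proved, stated in full; the proofs are below) =====
def Claim_equal_recursive_builder : Prop := ∀ (input_ : String) (instructions : List (String × String)), Dom_recursive_builder input_ instructions → Pre_recursive_builder input_ instructions → Spec_recursive_builder input_ instructions (recursive_builder input_ instructions)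

-- ===== LEMMAS AND PROOFS =====

-- the canonical result: head char, then for each adjacent pair the inserted string and the right char
def gIns (instructions : List (String × String)) (a b : Char) : List Char :=
  (rbGet instructions a b).toList

def buildTail (instructions : List (String × String)) : Char → List Char → List Char
  | _, [] => []
  | a, b :: t => gIns instructions a b ++ b :: buildTail instructions b t

def build (instructions : List (String × String)) : List Char → List Char
  | [] => []
  | a :: t => a :: buildTail instructions a t

theorem build_headD (ins : List (String × String)) (s : List Char) (hs : s ≠ []) (d : Char) :
    (build ins s).headD d = s.headD d := by
  cases s with
  | nil => exact absurd rfl hs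
  | cons a t => simp [build]

theorem getLastD_append_right (x : Char) (xs ys : List Char) (h : ys ≠ []) :
    (xs ++ ys).getLastD x = ys.getLastD x := by
  cases hy : ys.getLast? with
  | none => simp [List.getLast?_eq_none_iff] at hy; exact absurd hy h
  | some v => simp [List.getLastD_eq_getLast?, hy]

theorem build_getLastD (ins : List (String × String)) (s : List Char) (hs : s ≠ []) (d : Char) :
    (build ins s).getLastD d = s.getLastD d := by
  induction s with
  | nil => exact absurd rfl hs
  | cons a t ih =>
    cases t with
    | nil => simp [build, buildTail]
    | cons b t' =>
      have h := ih (by simp)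
      simp only [build, buildTail] at h ⊢
      rw [show a :: (gIns ins a b ++ b :: buildTail ins b t') =
            (a :: gIns ins a b) ++ b :: buildTail ins b t' by simp,
          getLastD_append_right d _ _ (by simp), h,
          show (a :: b :: t').getLastD d = (b :: t').getLastD d by
            simp [List.getLastD_eq_getLast?]]

theorem buildTail_append (ins : List (String × String)) (y : Char) (ys : List Char) :
    ∀ (a : Char) (t : List Char),
      buildTail ins a (t ++ y :: ys) =
        buildTail ins a t ++ gIns ins ((a :: t).getLastD ' ') y ++ y :: buildTail ins y ys := by
  intro a t
  induction t generalizing a with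
  | nil => simp [buildTail]
  | cons b t' ih => simp [buildTail, ih b]

theorem build_append (ins : List (String × String)) (xs ys : List Char) (hx : xs ≠ []) (hy : ys ≠ []) :
    build ins (xs ++ ys) =
      build ins xs ++ gIns ins (xs.getLastD ' ') (ys.headD ' ') ++ build ins ys := by
  cases xs with
  | nil => exact absurd rfl hx
  | cons a t =>
    cases ys with
    | nil => exact absurd rfl hy
    | cons y ys' => simp [build, buildTail_append]

theorem rbGo_eq_build (ins : List (String × String)) :
    ∀ (fuel : Nat) (s : List Char), s ≠ [] → s.length ≤ fuel → rbGo ins fuel s = build ins s := by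
  intro fuel
  induction fuel with
  | zero => intro s hs hl; cases s with
    | nil => exact absurd rfl hs
    | cons a t => simp at hl
  | succ fuel ih =>
    intro s hs hl
    by_cases h1 : s.length = 1
    · obtain ⟨c, rfl⟩ := List.length_eq_one_iff.mp h1
      simp [rbGo, build, buildTail]
    · have h2 : 2 ≤ s.length := by
        cases s with
        | nil => exact absurd rfl hs
        | cons a t => cases t with
          | nil => simp at h1
          | cons b t' => simp
      have hmid1 : 1 ≤ s.length / 2 := by omega
      have hmid2 : s.length / 2 < s.length := by omega
      have htake : s.take (s.length / 2) ≠ [] := by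
        apply List.ne_nil_of_length_pos
        rw [List.length_take]
        omega
      have hdrop : s.drop (s.length / 2) ≠ [] := by
        apply List.ne_nil_of_length_pos
        rw [List.length_drop]
        omega
      have hlt : (s.take (s.length / 2)).length ≤ fuel := by
        rw [List.length_take]; omega
      have hld : (s.drop (s.length / 2)).length ≤ fuel := by
        rw [List.length_drop]; omega
      have hL := ih (s.take (s.length / 2)) htake hlt
      have hR := ih (s.drop (s.length / 2)) hdrop hld
      rw [rbGo]
      simp only [if_neg h1]
      rw [hL, hR, build_getLastD _ _ htake, build_headD _ _ hdrop]
      have := build_append ins (s.take (s.length / 2)) (s.drop (s.length / 2)) htake hdrop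
      rw [List.take_append_drop] at this
      rw [this]
      simp [gIns, List.append_assoc]

theorem join_empty_eq_flatten : ∀ (xss : List (List Char)), PySem.Chars.join [] xss = xss.flatten := by
  intro xss
  induction xss with
  | nil => simp [PySem.Chars.join_nil]
  | cons x rest ih =>
    cases rest with
    | nil => simp [PySem.Chars.join_singleton]
    | cons y rest' => rw [PySem.Chars.join_cons_cons]; simp at ih ⊢; simp [ih]

theorem alt_fold (ins : List (String × String)) :
    ∀ (t : List Char) (a : Char) (acc : List String),
      (((((a :: t).zip t).foldl
        (fun acc p => acc ++ [rbGet ins p.1 p.2, String.ofList [p.2]]) acc).map String.toList).flatten)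
      = ((acc.map String.toList).flatten) ++ buildTail ins a t := by
  intro t
  induction t with
  | nil => intro a acc; simp [buildTail]
  | cons b t' ih =>
    intro a acc
    simp only [List.zip_cons_cons, List.foldl_cons]
    rw [ih b]
    simp [buildTail, gIns]

theorem alt_eq_build (ins : List (String × String)) (input_ : String) :
    recursive_builder_alt input_ ins = String.ofList (build ins input_.toList) := by
  apply String.toList_inj.mp
  simp only [recursive_builder_alt]
  rw [show (PySem.Str.join "" _).toList = _ from PySem.Str.toList_join _ _]
  cases h : input_.toList with
  | nil => simp [build]
  | cons a t =>
    simp only [List.tail_cons]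
    rw [show "".toList = ([] : List Char) from rfl, join_empty_eq_flatten]
    rw [show (a :: t).take 1 = [a] from by simp, alt_fold]
    simp [build]

-- ===== VERDICT (by name: the statement is the Claim_ definition above) =====
theorem recursive_builder_spec : Claim_equal_recursive_builder := by
  intro input_ ins _ hpre
  unfold Spec_recursive_builder
  have hne : input_.toList ≠ [] := fun h => hpre (String.toList_inj.mp h)
  rw [recursive_builder, rbGo_eq_build ins _ _ hne le_rfl, alt_eq_build]
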